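-- pv_equiv track=rewrite | github.com/aiautomationuk/RnRdrafts | app/imap_smtp_client.py | _normalize_reply_subject
-- ===== SOURCE A (Python) =====
-- def _normalize_reply_subject(subject: str) -> str:
--     subject = subject.strip()
--     if not subject:
--         return "Re: (no subject)"
--     lowered = subject.lower()
--     while lowered.startswith("re:"):
--         subject = subject[3:].lstrip()
--         lowered = subject.lower()
--     return f"Re: {subject}"
-- ===== SOURCE B (Python) =====
-- def _skip_re(cs):
--     # cs is a list of characters; recursively drop one case-insensitive
--     # "re:" prefix plus following whitespace at a time, char by char.
--     if len(cs) >= 3 and cs[0] in "rR" and cs[1] in "eE" and cs[2] == ":":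
--         rest = cs[3:]
--         i = 0
--         while i < len(rest) and rest[i].isspace():
--             i += 1
--         return _skip_re(rest[i:])
--     return cs
--
--
-- def _normalize_reply_subject(subject: str) -> str:
--     s = subject.strip()
--     if not s:
--         return "Re: (no subject)"
--     return "Re: " + "".join(_skip_re(list(s)))
-- ===== Notes on version B (the rewrite author's own statement) =====
-- stated objective: alternative
-- what changed: Replaces A's while-loop that re-lowercases the whole remaining string and re-slices on every iteration with a character-level recursion that pattern-matches the three leading characters case-insensitively and skips whitespace by index, never lowercasing the string.
import Mathlib
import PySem

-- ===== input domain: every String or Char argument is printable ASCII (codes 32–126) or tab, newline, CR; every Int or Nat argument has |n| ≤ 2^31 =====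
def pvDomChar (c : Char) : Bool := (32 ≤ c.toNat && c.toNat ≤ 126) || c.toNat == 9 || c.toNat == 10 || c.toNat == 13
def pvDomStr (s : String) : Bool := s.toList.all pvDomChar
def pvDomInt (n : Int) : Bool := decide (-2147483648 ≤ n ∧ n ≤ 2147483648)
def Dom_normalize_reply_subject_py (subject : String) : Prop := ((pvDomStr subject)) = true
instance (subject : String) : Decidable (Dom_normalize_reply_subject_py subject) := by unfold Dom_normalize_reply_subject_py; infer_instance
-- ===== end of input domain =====

-- ===== PORT A =====
-- B changes only the algorithm for stripping the leading "Re:" prefixes; return values agree (alternative decomposition, no speed claim).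

-- termination helper for A's while-loop (cited by name in decreasing_by)
theorem pvALoop_dec (cs : List Char)
    (h : PySem.Chars.startswith (PySem.Chars.lower cs) ['r', 'e', ':'] = true) :
    (PySem.Chars.lstrip (PySem.List.slice cs (some 3) none)).length < cs.length := by
  have hlen : 3 ≤ cs.length := by
    have := (PySem.Chars.startswith_iff _ _).mp h
    have := this.length_le
    simpa [PySem.Chars.lower] using this
  rw [PySem.List.slice_from _ (by norm_num : (0:Int) ≤ 3)]
  simp only [PySem.Chars.lstrip]
  have h1 := List.length_dropWhile_le PySem.Chars.isspace (cs.drop (3:Int).toNat)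
  have h2 : (cs.drop (3:Int).toNat).length = cs.length - 3 := by
    simp [List.length_drop]
  omega

-- the while-loop of A: `while lowered.startswith("re:"): subject = subject[3:].lstrip()`
def pvALoop (cs : List Char) : List Char :=
  if h : PySem.Chars.startswith (PySem.Chars.lower cs) ['r', 'e', ':'] = true then
    pvALoop (PySem.Chars.lstrip (PySem.List.slice cs (some 3) none))
  else cs
termination_by cs.length
decreasing_by exact pvALoop_dec cs h

def normalize_reply_subject_py (subject : String) : String :=
  let s := PySem.Str.strip subject
  if s = "" then "Re: (no subject)"
  else "Re: " ++ String.mk (pvALoop s.toList)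

-- ===== PORT B =====
-- B's helper `_skip_re`: recursion on the character list, matching the first three chars directly
def pvBSkip : List Char → List Char
  | c0 :: c1 :: c2 :: rest =>
    if (c0 = 'r' ∨ c0 = 'R') ∧ (c1 = 'e' ∨ c1 = 'E') ∧ c2 = ':' then
      pvBSkip (rest.dropWhile PySem.Chars.isspace)
    else c0 :: c1 :: c2 :: rest
  | cs => cs
termination_by cs => cs.length
decreasing_by
  have := List.length_dropWhile_le PySem.Chars.isspace rest
  simp only [List.length_cons]; omega

def normalize_reply_subject_py_alt (subject : String) : String :=
  let s := PySem.Str.strip subject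
  if s = "" then "Re: (no subject)"
  else "Re: " ++ String.mk (pvBSkip s.toList)

-- ===== PRECONDITION & SPEC =====
def Spec_normalize_reply_subject_py (subject : String) (out : String) : Prop := out = normalize_reply_subject_py_alt subject
instance (subject : String) (out : String) : Decidable (Spec_normalize_reply_subject_py subject out) := by unfold Spec_normalize_reply_subject_py; infer_instance

-- ===== CLAIM (what is proved, stated in full; the proofs are below) =====
def Claim_equal_normalize_reply_subject_py : Prop := ∀ (subject : String), Dom_normalize_reply_subject_py subject → Spec_normalize_reply_subject_py subject (normalize_reply_subject_py subject)

-- ===== LEMMAS AND PROOFS =====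



theorem pvCharEq (a b : Char) (h : a.toNat = b.toNat) : a = b :=
  Char.ofNat_toNat a ▸ Char.ofNat_toNat b ▸ congrArg Char.ofNat h

theorem pvLowerChar_eq (c t u : Char) (htu : t.toNat = u.toNat + 32)
    (hu : 65 ≤ u.toNat) (hu2 : u.toNat ≤ 90) :
    (PySem.Chars.lowerChar c = t ↔ (c = t ∨ c = u)) := by
  simp only [PySem.Chars.lowerChar, PySem.Chars.isupper, Bool.and_eq_true, decide_eq_true_eq]
  have hA : ('A' ≤ c ∧ c ≤ 'Z') ↔ (65 ≤ c.toNat ∧ c.toNat ≤ 90) := by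
    rw [Char.le_def, Char.le_def, UInt32.le_iff_toNat_le, UInt32.le_iff_toNat_le]; simp [Char.toNat_val]
  split_ifs with h
  · have hb := hA.mp h
    have hval : (Char.ofNat (c.toNat + 32)).toNat = c.toNat + 32 := by
      rw [Char.toNat_ofNat, if_pos (Or.inl (by omega))]
    constructor
    · intro he
      right
      have hc : c.toNat = u.toNat := by
        have h2 := congrArg Char.toNat he; rw [hval] at h2; omega
      exact pvCharEq _ _ hc
    · rintro (rfl | rfl)
      · exact absurd hb.2 (by omega)
      · exact pvCharEq _ _ (by rw [hval]; omega)
  · have hb : ¬ (65 ≤ c.toNat ∧ c.toNat ≤ 90) := fun hx => h (hA.mpr hx)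
    constructor
    · intro he; exact Or.inl he
    · rintro (rfl | rfl)
      · rfl
      · exact absurd ⟨hu, hu2⟩ hb

theorem pvLowerChar_colon (c : Char) : (PySem.Chars.lowerChar c = ':' ↔ c = ':') := by
  simp only [PySem.Chars.lowerChar, PySem.Chars.isupper, Bool.and_eq_true, decide_eq_true_eq]
  have hA : ('A' ≤ c ∧ c ≤ 'Z') ↔ (65 ≤ c.toNat ∧ c.toNat ≤ 90) := by
    rw [Char.le_def, Char.le_def, UInt32.le_iff_toNat_le, UInt32.le_iff_toNat_le]; simp [Char.toNat_val]
  split_ifs with h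
  · have hb := hA.mp h
    have hval : (Char.ofNat (c.toNat + 32)).toNat = c.toNat + 32 := by
      rw [Char.toNat_ofNat, if_pos (Or.inl (by omega))]
    constructor
    · intro he
      have h2 := congrArg Char.toNat he; rw [hval] at h2
      have hcol : (':' : Char).toNat = 58 := by decide
      rw [hcol] at h2; exact absurd h2 (by omega)
    · rintro rfl
      have hcol : (':' : Char).toNat = 58 := by decide
      rw [hcol] at hb; exact absurd hb.1 (by omega)
  · exact Iff.rfl

theorem pvCond (cs : List Char) :
    PySem.Chars.startswith (PySem.Chars.lower cs) ['r', 'e', ':'] = true ↔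
      (∃ c0 c1 c2 rest, cs = c0 :: c1 :: c2 :: rest ∧
        (c0 = 'r' ∨ c0 = 'R') ∧ (c1 = 'e' ∨ c1 = 'E') ∧ c2 = ':') := by
  match cs with
  | [] => simp [PySem.Chars.startswith, PySem.Chars.lower]
  | [c0] => simp [PySem.Chars.startswith, PySem.Chars.lower]
  | [c0, c1] => simp [PySem.Chars.startswith, PySem.Chars.lower]
  | c0 :: c1 :: c2 :: rest =>
    simp only [PySem.Chars.startswith, PySem.Chars.lower, List.map, List.isPrefixOf,
      Bool.and_eq_true, beq_iff_eq]
    rw [eq_comm (a := 'r'), eq_comm (a := 'e'), eq_comm (a := ':')]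
    rw [pvLowerChar_eq c0 'r' 'R' (by decide) (by decide) (by decide),
      pvLowerChar_eq c1 'e' 'E' (by decide) (by decide) (by decide),
      pvLowerChar_colon c2]
    constructor
    · rintro ⟨h0, h1, h2, -⟩; exact ⟨c0, c1, c2, rest, rfl, h0, h1, h2⟩
    · rintro ⟨d0, d1, d2, r, he, h0, h1, h2⟩
      cases he; exact ⟨h0, h1, h2, trivial⟩

theorem pvLoop_eq (cs : List Char) : pvALoop cs = pvBSkip cs := by
  by_cases h : PySem.Chars.startswith (PySem.Chars.lower cs) ['r', 'e', ':'] = true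
  · have hrec := pvLoop_eq (PySem.Chars.lstrip (PySem.List.slice cs (some 3) none))
    obtain ⟨c0, c1, c2, rest, rfl, h0, h1, h2⟩ := (pvCond cs).mp h
    rw [pvALoop, dif_pos h, hrec]
    rw [PySem.List.slice_from _ (by norm_num : (0:Int) ≤ 3)]
    conv_rhs => rw [pvBSkip]
    rw [if_pos ⟨h0, h1, h2⟩]
    rfl
  · rw [pvALoop, dif_neg h]
    match cs with
    | [] => simp [pvBSkip]
    | [c0] => simp [pvBSkip]
    | [c0, c1] => simp [pvBSkip]
    | c0 :: c1 :: c2 :: rest =>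
      rw [pvBSkip, if_neg]
      intro hb
      exact h ((pvCond _).mpr ⟨c0, c1, c2, rest, rfl, hb.1, hb.2.1, hb.2.2⟩)
termination_by cs.length
decreasing_by exact pvALoop_dec cs h

-- ===== VERDICT (by name: the statement is the Claim_ definition above) =====
theorem normalize_reply_subject_py_spec : Claim_equal_normalize_reply_subject_py := by
  intro subject _
  unfold Spec_normalize_reply_subject_py normalize_reply_subject_py normalize_reply_subject_py_alt
  simp only [pvLoop_eq]
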